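-- pv_equiv track=rewrite | github.com/holyorevil/ascend-model-agent-plugin | skills/ascend-history-to-skill/scripts/search_history.py | split_csv_args
-- ===== SOURCE A (Python) =====
-- def split_csv_args(values: list[str]) -> list[str]:
--     parts: list[str] = []
--     for value in values:
--         for part in value.split(","):
--             part = part.strip()
--             if part:
--                 parts.append(part)
--     return parts
-- ===== SOURCE B (Python) =====
-- def _flush(buf: list, parts: list) -> None:
--     while buf and buf[0].isspace():
--         buf = buf[1:]
--     while buf and buf[-1].isspace():
--         buf = buf[:-1]
--     if buf:
--         parts.append("".join(buf))
--
--
-- def split_csv_args(values: list[str]) -> list[str]: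
--     parts: list[str] = []
--     for value in values:
--         buf: list[str] = []
--         for ch in value:
--             if ch == ",":
--                 _flush(buf, parts)
--                 buf = []
--             else:
--                 buf.append(ch)
--         _flush(buf, parts)
--     return parts
-- ===== Notes on version B (the rewrite author's own statement) =====
-- stated objective: alternative
-- what changed: Replaces A's split/strip library calls with a hand-written character-level state machine: one scan per string accumulating a token buffer, flushing on each comma, with explicit two-ended whitespace trimming loops at flush time.
import Mathlib
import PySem

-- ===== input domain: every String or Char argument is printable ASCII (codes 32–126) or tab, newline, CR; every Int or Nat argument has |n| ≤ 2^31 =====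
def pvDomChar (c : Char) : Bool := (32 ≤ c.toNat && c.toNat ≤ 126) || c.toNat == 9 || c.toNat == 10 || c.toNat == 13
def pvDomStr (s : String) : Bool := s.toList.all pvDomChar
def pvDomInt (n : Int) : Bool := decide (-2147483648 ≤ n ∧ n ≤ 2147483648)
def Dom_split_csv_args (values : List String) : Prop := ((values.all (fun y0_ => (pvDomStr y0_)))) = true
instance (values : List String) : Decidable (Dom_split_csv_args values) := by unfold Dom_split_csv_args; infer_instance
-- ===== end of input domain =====

-- B replaces A's split/strip library calls by a hand-written character state machine
-- (token buffer, flush on comma, explicit two-ended whitespace trimming) — alternative decomposition, same cost.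

-- ===== PORT A =====
-- value.split(",") — PySem.Str.split? with the nonempty literal sep ",", unfolded (the none branch is unreachable)
def pySplitComma (s : String) : List String := (PySem.Chars.splitOn s.toList [',']).map String.ofList

def split_csv_args (values : List String) : List String :=
  values.foldl (fun parts value =>
    (pySplitComma value).foldl (fun parts part =>
      let part := PySem.Str.strip part
      if part ≠ "" then parts ++ [part] else parts) parts) []

-- ===== PORT B =====
-- `while buf and buf[0].isspace(): buf = buf[1:]`
def trimHead : List Char → List Char
  | [] => []
  | c :: cs => if PySem.Chars.isspace c then trimHead cs else c :: cs

-- `while buf and buf[-1].isspace(): buf = buf[:-1]`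
def trimTail (l : List Char) : List Char :=
  match h : l.getLast? with
  | none => l
  | some c => if PySem.Chars.isspace c then trimTail l.dropLast else l
termination_by l.length
decreasing_by
  have : l ≠ [] := by intro he; simp [he] at h
  simp [List.length_dropLast]
  exact List.length_pos_iff.mpr this

-- _flush(buf, parts)
def flushBuf (buf : List Char) (parts : List String) : List String :=
  let t := trimTail (trimHead buf)
  if t ≠ [] then parts ++ [String.ofList t] else parts

-- the inner `for ch in value` loop, carrying the buffer
def scanChars : List Char → List Char → List String → List String
  | [], buf, parts => flushBuf buf parts
  | c :: cs, buf, parts =>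
    if c = ',' then scanChars cs [] (flushBuf buf parts)
    else scanChars cs (buf ++ [c]) parts

def split_csv_args_alt (values : List String) : List String :=
  values.foldl (fun parts value => scanChars value.toList [] parts) []

-- ===== PRECONDITION & SPEC =====
def Spec_split_csv_args (values : List String) (out : List String) : Prop := out = split_csv_args_alt values
instance (values : List String) (out : List String) : Decidable (Spec_split_csv_args values out) := by unfold Spec_split_csv_args; infer_instance

-- ===== CLAIM (what is proved, stated in full; the proofs are below) =====
def Claim_equal_split_csv_args : Prop := ∀ (values : List String), Dom_split_csv_args values → Spec_split_csv_args values (split_csv_args values)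

-- ===== LEMMAS AND PROOFS =====

-- a direct structural characterisation of splitting on the single char ','
def splitc : List Char → List (List Char)
  | [] => [[]]
  | x :: xs =>
    if x = ',' then [] :: splitc xs
    else match splitc xs with
      | [] => [[x]]
      | h :: t => (x :: h) :: t

theorem splitc_ne_nil (l : List Char) : splitc l ≠ [] := by
  cases l with
  | nil => simp [splitc]
  | cons x xs =>
    simp only [splitc]
    split <;> [simp; split <;> simp]

theorem splitOn_go_spec : ∀ (fuel : Nat) (l cur : List Char) (acc : List (List Char)),
    l.length < fuel →
    PySem.Chars.splitOn.go [','] fuel l cur acc =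
      acc.reverse ++ (match splitc l with
        | [] => []
        | h :: t => (cur.reverse ++ h) :: t) := by
  intro fuel
  induction fuel with
  | zero => intro l cur acc h; omega
  | succ fuel ih =>
    intro l cur acc h
    cases l with
    | nil => simp [PySem.Chars.splitOn.go, splitc]
    | cons c rest =>
      by_cases hc : c = ','
      · subst hc
        rw [PySem.Chars.splitOn.go]
        have hpre : List.isPrefixOf [','] (',' :: rest) = true := by simp [List.isPrefixOf]
        simp only [hpre, if_true, List.length_cons, List.drop_succ_cons, List.length_nil, List.drop_zero]
        rw [ih rest [] (cur.reverse :: acc) (by simpa using Nat.lt_of_succ_lt_succ h)]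
        have := splitc_ne_nil rest
        cases hs : splitc rest with
        | nil => exact absurd hs this
        | cons h' t' => simp [splitc, hs]
      · rw [PySem.Chars.splitOn.go]
        have hpre : List.isPrefixOf [','] (c :: rest) = false := by
          simp [List.isPrefixOf, Ne.symm hc]
        simp only [hpre, Bool.false_eq_true, if_false]
        rw [ih rest (c :: cur) acc (by simpa using Nat.lt_of_succ_lt_succ h)]
        have := splitc_ne_nil rest
        cases hs : splitc rest with
        | nil => exact absurd hs this
        | cons h' t' => simp [splitc, hc, hs]

theorem splitOn_eq_splitc (l : List Char) : PySem.Chars.splitOn l [','] = splitc l := by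
  show PySem.Chars.splitOn.go [','] (l.length + 1) l [] [] = splitc l
  rw [splitOn_go_spec (l.length + 1) l [] [] (by omega)]
  have := splitc_ne_nil l
  cases hs : splitc l with
  | nil => exact absurd hs this
  | cons h t => simp

-- the token a flush emits (if any), in terms of PySem.Chars.strip
def emitTok (tok : List Char) : List String :=
  if PySem.Chars.strip tok ≠ [] then [String.ofList (PySem.Chars.strip tok)] else []

theorem trimHead_eq_lstrip (l : List Char) : trimHead l = PySem.Chars.lstrip l := by
  induction l with
  | nil => rfl
  | cons c cs ih =>
    by_cases h : PySem.Chars.isspace c = true <;>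
      simp [trimHead, PySem.Chars.lstrip, List.dropWhile, h] <;>
      simpa [PySem.Chars.lstrip] using ih

theorem trimTail_eq_rstrip (l : List Char) : trimTail l = PySem.Chars.rstrip l := by
  induction hn : l.length using Nat.strong_induction_on generalizing l with
  | _ n ih =>
    rw [trimTail]
    cases hg : l.getLast? with
    | none => simp [List.getLast?_eq_none_iff.mp hg, PySem.Chars.rstrip]
    | some c =>
      obtain ⟨l', rfl⟩ := List.getLast?_eq_some_iff.mp hg
      by_cases hw : PySem.Chars.isspace c = true
      · simp only [hw, if_true, List.dropLast_concat]
        rw [ih l'.length (by simp at hn; omega) l' rfl]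
        simp [PySem.Chars.rstrip, List.reverse_append, hw]
      · simp only [hw, Bool.false_eq_true, if_false]
        simp [PySem.Chars.rstrip, List.reverse_append, List.dropWhile_cons, hw]

theorem flushBuf_eq (buf : List Char) (parts : List String) :
    flushBuf buf parts = parts ++ emitTok buf := by
  unfold flushBuf emitTok
  rw [trimHead_eq_lstrip, trimTail_eq_rstrip]
  have hs : PySem.Chars.rstrip (PySem.Chars.lstrip buf) = PySem.Chars.strip buf := rfl
  rw [hs]
  split <;> simp_all

theorem scanChars_spec : ∀ (cs buf : List Char) (parts : List String),
    scanChars cs buf parts =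
      parts ++ (match splitc cs with
        | [] => []
        | h :: t => emitTok (buf ++ h) ++ t.flatMap emitTok) := by
  intro cs
  induction cs with
  | nil => intro buf parts; simp [scanChars, splitc, flushBuf_eq]
  | cons c cs ih =>
    intro buf parts
    by_cases hc : c = ','
    · subst hc
      simp only [scanChars, if_pos rfl, ih, flushBuf_eq, splitc]
      have := splitc_ne_nil cs
      cases hs : splitc cs with
      | nil => exact absurd hs this
      | cons h t => simp
    · simp only [scanChars, if_neg hc, ih, splitc, hc, if_false]
      have := splitc_ne_nil cs
      cases hs : splitc cs with
      | nil => exact absurd hs this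
      | cons h t => simp

-- what each value of the list contributes, as A computes it
def contrib (v : String) : List String :=
  ((pySplitComma v).map PySem.Str.strip).filter (fun p => p ≠ "")

theorem inner_fold (v : String) (init : List String) :
    (pySplitComma v).foldl (fun parts part =>
      let part := PySem.Str.strip part
      if part ≠ "" then parts ++ [part] else parts) init = init ++ contrib v := by
  have e : (fun (parts : List String) part =>
      let part := PySem.Str.strip part
      if part ≠ "" then parts ++ [part] else parts)
    = (fun acc x => if (fun p => decide (PySem.Str.strip p ≠ "")) x = true
        then acc ++ [PySem.Str.strip x] else acc) := by
    funext acc x; simp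
  rw [e, PySem.List.foldl_append_if]
  unfold contrib
  rw [List.filter_map]
  simp [Function.comp_def]

theorem a_flatMap (values : List String) :
    split_csv_args values = values.flatMap contrib := by
  unfold split_csv_args
  suffices h : ∀ init, values.foldl (fun parts value =>
      (pySplitComma value).foldl (fun parts part =>
        let part := PySem.Str.strip part
        if part ≠ "" then parts ++ [part] else parts) parts) init = init ++ values.flatMap contrib by
    simpa using h []
  induction values with
  | nil => simp
  | cons v vs ih =>
    intro init
    rw [List.foldl_cons, inner_fold, ih, List.flatMap_cons, List.append_assoc]

theorem ofList_eq_empty_iff (t : List Char) : String.ofList t = "" ↔ t = [] := by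
  constructor
  · intro h
    have := congrArg String.toList h
    simpa using this
  · rintro rfl; rfl

theorem strip_ofList (tok : List Char) :
    PySem.Str.strip (String.ofList tok) = String.ofList (PySem.Chars.strip tok) := by
  simp [PySem.Str.strip]

theorem map_filter_eq_flatMap_emit : ∀ (l : List (List Char)),
    ((l.map (fun tok => PySem.Str.strip (String.ofList tok))).filter (fun p => p ≠ ""))
      = l.flatMap emitTok := by
  intro l
  induction l with
  | nil => rfl
  | cons tok rest ih =>
    have ih' : List.filter (fun p => !decide (p = ""))
        (List.map (fun tok => String.ofList (PySem.Chars.strip tok)) rest)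
        = List.flatMap emitTok rest := by
      simpa [strip_ofList, ne_eq, decide_not] using ih
    simp only [List.map_cons, List.filter_cons, List.flatMap_cons, strip_ofList]
    by_cases h : PySem.Chars.strip tok = [] <;>
      simp [emitTok, h, ih', ofList_eq_empty_iff]

theorem contrib_eq_flatMap_emit (v : String) :
    contrib v = (splitc v.toList).flatMap emitTok := by
  unfold contrib pySplitComma
  rw [splitOn_eq_splitc, List.map_map]
  have : (PySem.Str.strip ∘ String.ofList) = (fun tok => PySem.Str.strip (String.ofList tok)) := rfl
  rw [this, map_filter_eq_flatMap_emit]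

theorem b_flatMap (values : List String) :
    split_csv_args_alt values = values.flatMap contrib := by
  unfold split_csv_args_alt
  suffices h : ∀ init, values.foldl (fun parts value => scanChars value.toList [] parts) init
      = init ++ values.flatMap contrib by
    simpa using h []
  induction values with
  | nil => simp
  | cons v vs ih =>
    intro init
    rw [List.foldl_cons, scanChars_spec, List.flatMap_cons, contrib_eq_flatMap_emit]
    have := splitc_ne_nil v.toList
    cases hs : splitc v.toList with
    | nil => exact absurd hs this
    | cons h t => simp [ih, List.flatMap_cons]

-- ===== VERDICT (by name: the statement is the Claim_ definition above) =====
theorem split_csv_args_spec : Claim_equal_split_csv_args := by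
  intro values _
  unfold Spec_split_csv_args
  rw [a_flatMap, b_flatMap]
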